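-- pv_equiv track=rewrite | github.com/gjtjdtn201/practice | 20200509 카카오코테/1번.py | solution
-- ===== SOURCE A (Python) =====
-- def solution(numbers, hand):
--     answer = ''
--     lp, rp = 10, 12
--     num_list = [(1, 2, 3, 4), (2, 1, 2, 3), (3, 2, 1, 2), (4, 3, 2, 1)]
--     mid_num = [2, 5, 8, 0]
--     for i in numbers:
--         if i == 1 or i == 4 or i == 7:
--             answer += 'L'
--             lp = i
--         elif i == 3 or i == 6 or i == 9:
--             answer += 'R'
--             rp = i
--         else:
--             idx = mid_num.index(i)
--             if lp in mid_num:
--                 lpt = 11 if lp == 0 else lp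
--                 lpd = num_list[(lpt-2)//3][idx]-1
--             else:
--                 lpd = num_list[(lp-1)//3][idx]
--             if rp in mid_num:
--                 rpt = 11 if rp == 0 else rp
--                 rpd = num_list[(rpt-2)//3][idx]-1
--             else:
--                 rpd = num_list[(rp-3)//3][idx]
--             if lpd == rpd:
--                 if hand == 'right':
--                     answer += 'R'
--                     rp = i
--                 else:
--                     answer += 'L'
--                     lp = i
--             elif lpd < rpd:
--                 answer += 'L'
--                 lp = i
--             else:
--                 answer += 'R'
--                 rp = i
--
--     return answer
-- ===== SOURCE B (Python) =====
-- POS = {1: (0, 0), 2: (0, 1), 3: (0, 2),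
--        4: (1, 0), 5: (1, 1), 6: (1, 2),
--        7: (2, 0), 8: (2, 1), 9: (2, 2),
--        0: (3, 1)}
--
--
-- def _last(history, letter, start):
--     # coordinate of the thumb that types `letter`: the last digit it pressed, else its start key
--     for d, l in reversed(history):
--         if l == letter:
--             return POS[d]
--     return start
--
--
-- def solution(numbers, hand):
--     # Keeps the full press history [(digit, letter)] instead of thumb-position state;
--     # each decision recomputes the thumbs' coordinates by scanning the history backwards.
--     history = []
--     for n in numbers:
--         r, c = POS[n]
--         if c == 0:
--             letter = 'L'
--         elif c == 2:
--             letter = 'R'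
--         else:
--             lr, lc = _last(history, 'L', (3, 0))
--             rr, rc = _last(history, 'R', (3, 2))
--             dl = abs(lr - r) + abs(lc - c)
--             dr = abs(rr - r) + abs(rc - c)
--             letter = 'L' if dl < dr or (dl == dr and hand != 'right') else 'R'
--         history.append((n, letter))
--     return ''.join(l for _, l in history)
-- ===== Notes on version B (the rewrite author's own statement) =====
-- stated objective: alternative
-- what changed: B maintains no thumb-position state at all: it keeps the full press history [(digit, letter)] and, for each middle-column digit, recomputes each thumb's coordinate by scanning the history backwards for that thumb's last press, comparing Manhattan distances on grid coordinates instead of A's precomputed distance table with index arithmetic.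
-- outside the precondition, e.g. on solution([11], 'right'): A raises ValueError, B raises KeyError
import Mathlib
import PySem

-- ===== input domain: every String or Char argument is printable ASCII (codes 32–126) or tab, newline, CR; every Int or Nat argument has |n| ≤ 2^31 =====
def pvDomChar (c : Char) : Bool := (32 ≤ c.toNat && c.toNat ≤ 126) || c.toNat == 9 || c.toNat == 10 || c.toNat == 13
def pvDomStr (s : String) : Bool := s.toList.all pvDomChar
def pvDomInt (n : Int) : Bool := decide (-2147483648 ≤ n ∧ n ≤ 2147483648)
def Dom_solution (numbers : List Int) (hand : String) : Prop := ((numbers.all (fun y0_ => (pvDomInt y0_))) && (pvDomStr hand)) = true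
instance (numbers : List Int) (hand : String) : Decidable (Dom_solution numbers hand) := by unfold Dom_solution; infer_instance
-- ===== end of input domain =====

-- B keeps no thumb state: it records the full press history and recomputes each thumb's
-- coordinate by a backward scan of that history (objective: alternative).

-- ===== PORT A =====
def pvNumList : List (List Int) := [[1, 2, 3, 4], [2, 1, 2, 3], [3, 2, 1, 2], [4, 3, 2, 1]]
def pvMidNum : List Int := [2, 5, 8, 0]

-- loop body of A (the state is (answer, lp, rp)); total forms getD/pyGetD are used only
-- where Pre_solution guarantees the Python look-ups succeed
def pvStepA (hand : String) (st : List Char × Int × Int) (i : Int) : List Char × Int × Int :=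
  let answer := st.1; let lp := st.2.1; let rp := st.2.2
  if i = 1 ∨ i = 4 ∨ i = 7 then (answer ++ ['L'], i, rp)
  else if i = 3 ∨ i = 6 ∨ i = 9 then (answer ++ ['R'], lp, i)
  else
    let idx := (PySem.List.index? pvMidNum i).getD 0
    let lpd :=
      if lp ∈ pvMidNum then
        let lpt := if lp = 0 then 11 else lp
        PySem.List.pyGetD (PySem.List.pyGetD pvNumList (PySem.Int.floordiv (lpt - 2) 3) []) idx 0 - 1
      else
        PySem.List.pyGetD (PySem.List.pyGetD pvNumList (PySem.Int.floordiv (lp - 1) 3) []) idx 0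
    let rpd :=
      if rp ∈ pvMidNum then
        let rpt := if rp = 0 then 11 else rp
        PySem.List.pyGetD (PySem.List.pyGetD pvNumList (PySem.Int.floordiv (rpt - 2) 3) []) idx 0 - 1
      else
        PySem.List.pyGetD (PySem.List.pyGetD pvNumList (PySem.Int.floordiv (rp - 3) 3) []) idx 0
    if lpd = rpd then
      if hand = "right" then (answer ++ ['R'], lp, i) else (answer ++ ['L'], i, rp)
    else if lpd < rpd then (answer ++ ['L'], i, rp)
    else (answer ++ ['R'], lp, i)

def solution (numbers : List Int) (hand : String) : String :=
  String.ofList (numbers.foldl (pvStepA hand) ([], 10, 12)).1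

-- ===== PORT B =====
def pvPos : PySem.Dict Int (Int × Int) :=
  PySem.Dict.ofList [(1, (0, 0)), (2, (0, 1)), (3, (0, 2)),
                     (4, (1, 0)), (5, (1, 1)), (6, (1, 2)),
                     (7, (2, 0)), (8, (2, 1)), (9, (2, 2)),
                     (0, (3, 1))]

-- `_last`: backward scan of the press history for a thumb's most recent press
-- (the `for … in reversed(history)` loop is the recursion over `history.reverse`)
def pvLastAux (rev : List (Int × Char)) (letter : Char) (start : Int × Int) : Int × Int :=
  match rev with
  | [] => start
  | (d, l) :: rest =>
    if l = letter then PySem.Dict.getD pvPos d (0, 0) else pvLastAux rest letter start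

def pvLast (history : List (Int × Char)) (letter : Char) (start : Int × Int) : Int × Int :=
  pvLastAux history.reverse letter start

-- loop body of B (the state is the press history); getD is total only where
-- Pre_solution guarantees the Python dict look-up succeeds
def pvStepB (hand : String) (history : List (Int × Char)) (n : Int) : List (Int × Char) :=
  let rc := PySem.Dict.getD pvPos n (0, 0)
  let r := rc.1; let c := rc.2
  let letter :=
    if c = 0 then 'L'
    else if c = 2 then 'R'
    else
      let lrc := pvLast history 'L' (3, 0)
      let rrc := pvLast history 'R' (3, 2)
      let dl := (lrc.1 - r).natAbs + (lrc.2 - c).natAbs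
      let dr := (rrc.1 - r).natAbs + (rrc.2 - c).natAbs
      if dl < dr ∨ (dl = dr ∧ hand ≠ "right") then 'L' else 'R'
  history ++ [(n, letter)]

def solution_alt (numbers : List Int) (hand : String) : String :=
  String.ofList ((numbers.foldl (pvStepB hand) []).map Prod.snd)

-- ===== PRECONDITION & SPEC =====
-- Pre_ admits exactly the keypad digits 0..9: on any other element A raises ValueError
-- (mid_num.index) and B raises KeyError.
def Pre_solution (numbers : List Int) (hand : String) : Prop :=
  ∀ i ∈ numbers, i ∈ ([0, 1, 2, 3, 4, 5, 6, 7, 8, 9] : List Int)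
instance (numbers : List Int) (hand : String) : Decidable (Pre_solution numbers hand) := by
  unfold Pre_solution; infer_instance

def pvWitness_solution : List Int × String := ([1, 5, 0, 9, 2], "right")

def Spec_solution (numbers : List Int) (hand : String) (out : String) : Prop := out = solution_alt numbers hand
instance (numbers : List Int) (hand : String) (out : String) : Decidable (Spec_solution numbers hand out) := by unfold Spec_solution; infer_instance

-- ===== CLAIM (what is proved, stated in full; the proofs are below) =====
def Claim_equal_solution : Prop := ∀ (numbers : List Int) (hand : String), Dom_solution numbers hand → Pre_solution numbers hand → Spec_solution numbers hand (solution numbers hand)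

-- ===== LEMMAS AND PROOFS =====

-- the valid resting places of each thumb, and the coordinates they stand for
def pvLset : List Int := [10, 1, 4, 7, 2, 5, 8, 0]
def pvRset : List Int := [12, 3, 6, 9, 2, 5, 8, 0]

def pvCoord (p : Int) : Int × Int :=
  if p = 10 then (3, 0) else if p = 12 then (3, 2) else PySem.Dict.getD pvPos p (0, 0)

-- the letter B chooses, as a function of the two thumb coordinates
def pvLetter (hand : String) (left right : Int × Int) (n : Int) : Char :=
  let rc := PySem.Dict.getD pvPos n (0, 0)
  let r := rc.1; let c := rc.2
  if c = 0 then 'L'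
  else if c = 2 then 'R'
  else
    let dl := (left.1 - r).natAbs + (left.2 - c).natAbs
    let dr := (right.1 - r).natAbs + (right.2 - c).natAbs
    if dl < dr ∨ (dl = dr ∧ hand ≠ "right") then 'L' else 'R'

lemma pvStepB_eq (hand : String) (history : List (Int × Char)) (n : Int) :
    pvStepB hand history n =
      history ++ [(n, pvLetter hand (pvLast history 'L' (3, 0)) (pvLast history 'R' (3, 2)) n)] := by
  rfl

lemma pvLast_append (history : List (Int × Char)) (n : Int) (l letter : Char) (s : Int × Int) :
    pvLast (history ++ [(n, l)]) letter s =
      if l = letter then PySem.Dict.getD pvPos n (0, 0) else pvLast history letter s := by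
  unfold pvLast
  rw [List.reverse_append]
  rfl

lemma pvStepA_ans (hand : String) (a : List Char) (lp rp i : Int) :
    pvStepA hand (a, lp, rp) i =
      (a ++ (pvStepA hand ([], lp, rp) i).1, (pvStepA hand ([], lp, rp) i).2) := by
  unfold pvStepA; dsimp only; split_ifs <;> simp

lemma pvStepA_ne (hand : String) (h : hand ≠ "right") : pvStepA hand = pvStepA "" := by
  funext st i; unfold pvStepA; simp [h]

lemma pvLetter_ne (hand : String) (h : hand ≠ "right") : pvLetter hand = pvLetter "" := by
  funext l r n; unfold pvLetter; simp [h]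

-- per-press agreement: B's chosen letter is the one A appends, and the thumb whose
-- coordinate changes moves to exactly pvCoord of A's new pointer
lemma pvStep_agree (hand : String) :
    ∀ i ∈ ([0, 1, 2, 3, 4, 5, 6, 7, 8, 9] : List Int), ∀ lp ∈ pvLset, ∀ rp ∈ pvRset,
      (pvStepA hand ([], lp, rp) i).1 = [pvLetter hand (pvCoord lp) (pvCoord rp) i] ∧
      (if pvLetter hand (pvCoord lp) (pvCoord rp) i = 'L'
         then PySem.Dict.getD pvPos i (0, 0) else pvCoord lp) = pvCoord (pvStepA hand ([], lp, rp) i).2.1 ∧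
      (if pvLetter hand (pvCoord lp) (pvCoord rp) i = 'R'
         then PySem.Dict.getD pvPos i (0, 0) else pvCoord rp) = pvCoord (pvStepA hand ([], lp, rp) i).2.2 ∧
      (pvStepA hand ([], lp, rp) i).2.1 ∈ pvLset ∧ (pvStepA hand ([], lp, rp) i).2.2 ∈ pvRset := by
  by_cases h : hand = "right"
  · subst h; decide
  · rw [pvStepA_ne hand h, pvLetter_ne hand h]; decide

lemma pvLoop_agree (hand : String) :
    ∀ (numbers : List Int),
      (∀ i ∈ numbers, i ∈ ([0, 1, 2, 3, 4, 5, 6, 7, 8, 9] : List Int)) →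
      ∀ (a : List Char) (history : List (Int × Char)) (lp rp : Int),
        lp ∈ pvLset → rp ∈ pvRset →
        a = history.map Prod.snd →
        pvLast history 'L' (3, 0) = pvCoord lp →
        pvLast history 'R' (3, 2) = pvCoord rp →
        (numbers.foldl (pvStepA hand) (a, lp, rp)).1 =
          (numbers.foldl (pvStepB hand) history).map Prod.snd := by
  intro numbers
  induction numbers with
  | nil => intro _ a history lp rp _ _ ha _ _; simpa using ha
  | cons i rest ih =>
    intro hpre a history lp rp hlp hrp ha hL hR
    have hi := hpre i (List.mem_cons_self ..)
    obtain ⟨h1, h2, h3, h4, h5⟩ := pvStep_agree hand i hi lp hlp rp hrp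
    simp only [List.foldl_cons]
    rw [pvStepA_ans, pvStepB_eq, hL, hR]
    set L := pvLetter hand (pvCoord lp) (pvCoord rp) i
    refine ih (fun j hj => hpre j (List.mem_cons_of_mem _ hj))
      _ _ (pvStepA hand ([], lp, rp) i).2.1 (pvStepA hand ([], lp, rp) i).2.2 h4 h5 ?_ ?_ ?_
    · rw [h1, ha]; simp
    · rw [pvLast_append, ← h2, hL]
    · rw [pvLast_append, ← h3, hR]

-- ===== VERDICT (by name: the statement is the Claim_ definition above) =====
theorem solution_spec : Claim_equal_solution := by
  intro numbers hand _ hpre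
  unfold Spec_solution solution solution_alt
  have h := pvLoop_agree hand numbers hpre [] [] 10 12 (by decide) (by decide) rfl (by decide) (by decide)
  rw [h]
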